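-- pv_equiv track=rewrite | github.com/masanpoc/cs-py | src/computing/data-structures/dictionaries/group.py | name_lists
-- ===== SOURCE A (Python) =====
-- def name_lists(name_list):
--     result = {}
--     for val in name_list:
--         name = val.split()[0]
--         if name not in result:
--             result[name] = [val]
--         else:
--             result[name].append(val)
--         result[name].sort()
--     return result
-- ===== SOURCE B (Python) =====
-- def name_lists(name_list):
--     result = {val.split()[0]: [] for val in name_list}
--     for val in sorted(name_list):
--         result[val.split()[0]].append(val)
--     return result
-- ===== Notes on version B (the rewrite author's own statement) =====
-- stated objective: faster
-- what changed: A inserts each element and re-sorts the affected group inside the loop; B first builds the key skeleton (a dict comprehension over the original list, fixing first-occurrence key order), then sorts the whole list once globally and distributes elements into their groups with plain appends and no per-group sorting, relying on the global sort to deliver each group already in sorted order.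
import Mathlib
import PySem

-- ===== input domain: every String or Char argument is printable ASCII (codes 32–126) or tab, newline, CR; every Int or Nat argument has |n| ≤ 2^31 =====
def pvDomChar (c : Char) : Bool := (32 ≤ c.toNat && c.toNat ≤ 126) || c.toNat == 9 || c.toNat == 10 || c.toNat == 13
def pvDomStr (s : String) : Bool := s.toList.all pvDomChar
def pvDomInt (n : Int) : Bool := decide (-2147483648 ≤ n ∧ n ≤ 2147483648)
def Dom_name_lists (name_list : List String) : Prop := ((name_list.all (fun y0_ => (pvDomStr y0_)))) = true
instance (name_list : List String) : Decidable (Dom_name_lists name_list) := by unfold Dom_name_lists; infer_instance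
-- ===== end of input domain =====

-- B replaces A's per-element group re-sorting by: build the key skeleton first (a dict
-- comprehension over the original list, fixing key order), then one global sort of the
-- whole list and a distribution pass with plain appends — correct because a global sort
-- delivers the members of each group already in sorted order. Return value only; neither
-- version mutates its input.

-- ===== PORT A =====
-- A: one loop; each step inserts/appends val under its first word, then re-sorts that group.
-- val.split()[0] raises IndexError when the string has no words; Pre_ excludes those inputs,
-- the port uses headD "" there (value irrelevant outside Pre_).
def name_lists (name_list : List String) : List (String × List String) :=
  (name_list.foldl
    (fun (result : PySem.Dict String (List String)) val =>
      let name := (PySem.Str.split₀ val).headD ""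
      let result :=
        if result.contains name = false then result.insert name [val]
        else result.modify name [] (fun g => g ++ [val])
      result.modify name [] (fun g => PySem.List.sorted g (fun x => x) false))
    PySem.Dict.empty).items

-- ===== PORT B =====
-- B: key-skeleton comprehension ({val.split()[0]: [] for val in name_list}), then a loop
-- over sorted(name_list) appending each val to result[its first word].
def name_lists_alt (name_list : List String) : List (String × List String) :=
  ((PySem.List.sorted name_list (fun x => x) false).foldl
      (fun (result : PySem.Dict String (List String)) val =>
        result.modify ((PySem.Str.split₀ val).headD "") [] (fun g => g ++ [val]))
      (name_list.foldl
        (fun (result : PySem.Dict String (List String)) val =>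
          result.insert ((PySem.Str.split₀ val).headD "") []) PySem.Dict.empty)).items

-- ===== PRECONDITION & SPEC =====
-- Pre_ excludes exactly the inputs containing a word-free (empty or all-whitespace) string,
-- on which the Python A (and B alike) raises IndexError at val.split()[0].
def Pre_name_lists (name_list : List String) : Prop :=
  ∀ s ∈ name_list, PySem.Str.split₀ s ≠ []
instance (name_list : List String) : Decidable (Pre_name_lists name_list) := by
  unfold Pre_name_lists; infer_instance
def pvWitness_name_lists : List String := ["alice x", "bob", "alice a"]

def Spec_name_lists (name_list : List String) (out : List (String × List String)) : Prop := out = name_lists_alt name_list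
instance (name_list : List String) (out : List (String × List String)) : Decidable (Spec_name_lists name_list out) := by unfold Spec_name_lists; infer_instance

-- ===== CLAIM (what is proved, stated in full; the proofs are below) =====
def Claim_equal_name_lists : Prop := ∀ (name_list : List String), Dom_name_lists name_list → Pre_name_lists name_list → Spec_name_lists name_list (name_lists name_list)

-- ===== LEMMAS AND PROOFS =====

-- first word of a string (A's and B's common key function)
def pvKey (v : String) : String := (PySem.Str.split₀ v).headD ""

-- the plain append-grouping fold, a proof-side reference point for BOTH ports
def pvG (l : List String) : PySem.Dict String (List String) :=
  l.foldl (fun d v => d.modify (pvKey v) [] (fun g => g ++ [v])) PySem.Dict.empty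

-- value-sorting map applied to a dict's items
def pvSortKV (kv : String × List String) : String × List String :=
  (kv.1, PySem.List.sorted kv.2 (fun x => x) false)

-- mapping pvSortKV over the items preserves the key set, hence `contains`
lemma contains_mapSort (L : List (String × List String)) (k : String) :
    (PySem.Dict.mk (L.map pvSortKV)).contains k = (PySem.Dict.mk L).contains k := by
  simp [PySem.Dict.contains, List.any_map, Function.comp_def, pvSortKV]

lemma get?_mapSort (L : List (String × List String)) (k : String) :
    (PySem.Dict.mk (L.map pvSortKV)).get? k
      = ((PySem.Dict.mk L).get? k).map (fun g => PySem.List.sorted g (fun x => x) false) := by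
  induction L with
  | nil => rfl
  | cons p t ih =>
      obtain ⟨pk, pv⟩ := p
      simp only [List.map_cons, pvSortKV]
      by_cases h : pk == k
      · simp [PySem.Dict.get?_mk_cons, h]
      · simp [PySem.Dict.get?_mk_cons, h, ih]

-- sorting after appending to an already-sorted list = sorting the raw appended list
lemma sorted_sorted_append (g : List String) (v : String) :
    PySem.List.sorted (PySem.List.sorted g (fun x => x) false ++ [v]) (fun x => x) false
      = PySem.List.sorted (g ++ [v]) (fun x => x) false := by
  apply PySem.List.sorted_eq_sorted_of_perm
  · exact fun a b h => h
  · exact (PySem.List.sorted_perm g (fun x => x) false).append (List.Perm.refl [v])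

-- inserting a sorted value into the value-sorted dict = value-sorting after inserting the raw value
lemma insert_mapSort (L : List (String × List String)) (k : String) (v : List String) :
    (PySem.Dict.mk (L.map pvSortKV)).insert k (PySem.List.sorted v (fun x => x) false)
      = PySem.Dict.mk ((((PySem.Dict.mk L).insert k v).items).map pvSortKV) := by
  simp only [PySem.Dict.insert, contains_mapSort]
  by_cases h : (PySem.Dict.mk L).contains k
  · simp only [h, if_true]
    congr 1
    simp only [List.map_map]
    apply List.map_congr_left
    intro p _
    by_cases hp : p.1 = k <;> simp [hp, pvSortKV]
  · simp [h, pvSortKV]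

-- A's loop body equals: insert the (possibly extended) group, sorted
lemma astep_eq (d : PySem.Dict String (List String)) (name val : String) :
    ((if d.contains name = false then d.insert name [val]
      else d.modify name [] (fun g => g ++ [val])).modify name []
        (fun g => PySem.List.sorted g (fun x => x) false))
      = d.insert name (PySem.List.sorted (d.getD name [] ++ [val]) (fun x => x) false) := by
  by_cases h : d.contains name
  · simp [h, PySem.Dict.modify, PySem.Dict.getD_insert_self, PySem.Dict.insert_insert_self]
  · have h0 : d.getD name [] = [] :=
      PySem.Dict.getD_of_not_contains _ _ (by simpa using h)
    simp [h, h0, PySem.Dict.modify, PySem.Dict.getD_insert_self, PySem.Dict.insert_insert_self]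

lemma getD_mapSort (L : List (String × List String)) (k : String) :
    (PySem.Dict.mk (L.map pvSortKV)).getD k []
      = PySem.List.sorted ((PySem.Dict.mk L).getD k []) (fun x => x) false := by
  rw [PySem.Dict.getD_eq_get?_getD, PySem.Dict.getD_eq_get?_getD, get?_mapSort]
  cases ((PySem.Dict.mk L).get? k) <;> simp [PySem.List.sorted]

-- A's fold from the value-sorted image of d equals the value-sorted image of the plain grouping fold from d
lemma fold_invariant (l : List String) (L : List (String × List String)) :
    l.foldl
      (fun (result : PySem.Dict String (List String)) val =>
        let name := (PySem.Str.split₀ val).headD ""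
        let result :=
          if result.contains name = false then result.insert name [val]
          else result.modify name [] (fun g => g ++ [val])
        result.modify name [] (fun g => PySem.List.sorted g (fun x => x) false))
      (PySem.Dict.mk (L.map pvSortKV))
    = PySem.Dict.mk
        (((l.foldl
            (fun (groups : PySem.Dict String (List String)) val =>
              groups.modify ((PySem.Str.split₀ val).headD "") [] (fun g => g ++ [val]))
            (PySem.Dict.mk L)).items).map pvSortKV) := by
  induction l generalizing L with
  | nil => rfl
  | cons v t ih =>
      simp only [List.foldl_cons]
      rw [astep_eq, getD_mapSort, sorted_sorted_append, insert_mapSort]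
      exact ih (((PySem.Dict.mk L).modify ((PySem.Str.split₀ v).headD "") []
        (fun g => g ++ [v])).items)

-- A's port is the value-sorted items of the plain grouping fold
lemma name_lists_eq_sortG (l : List String) :
    name_lists l = (pvG l).items.map pvSortKV := by
  unfold name_lists pvG pvKey
  have h := fold_invariant l []
  simp only [List.map_nil] at h
  rw [show (PySem.Dict.empty : PySem.Dict String (List String))
        = PySem.Dict.mk [] from rfl, h]

-- Set.update is a no-op when every new element is already present
lemma set_update_of_subset (m s : List String) (h : ∀ x ∈ m, x ∈ s) :
    PySem.Set.update s m = s := by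
  induction m generalizing s with
  | nil => rfl
  | cons x t ih =>
      have hx : PySem.Set.add s x = s := by
        simp [PySem.Set.add, PySem.Set.contains, h x (by simp)]
      simp [PySem.Set.update, List.foldl_cons, hx]
      have := ih s (fun y hy => h y (by simp [hy]))
      simpa [PySem.Set.update] using this

-- keys of the plain grouping fold: the distinct keys in first-occurrence order
lemma keys_pvG (l : List String) :
    (pvG l).keys = PySem.Set.ofList (l.map pvKey) := by
  unfold pvG
  rw [PySem.Dict.keys_foldl_modify_key]
  simp [PySem.Dict.keys_empty, PySem.Set.update, PySem.Set.ofList_eq_foldl]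

lemma nodup_keys_pvG (l : List String) : (pvG l).keys.Nodup := by
  unfold pvG
  exact PySem.Dict.nodup_keys_foldl_modify_key _ _ _ _ _ (by simp [PySem.Dict.keys_empty])

-- values of a grouping fold: the start value extended by the filtered elements
lemma getD_group_fold (m : List String) (d : PySem.Dict String (List String)) (c : String) :
    (m.foldl (fun d v => d.modify (pvKey v) [] (fun g => g ++ [v])) d).getD c []
      = d.getD c [] ++ m.filter (fun v => pvKey v == c) := by
  have : m.foldl (fun d v => d.modify (pvKey v) [] (fun g => g ++ [v])) d
      = (m.map (fun v => (pvKey v, v))).foldl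
          (fun d (p : String × String) => d.modify p.1 [] (fun g => g ++ [p.2])) d := by
    rw [List.foldl_map]
  rw [this, PySem.Dict.getD_foldl_modify_append]
  congr 1
  rw [List.filter_map]
  simp [Function.comp_def, List.map_map]

lemma getD_pvG (l : List String) (c : String) :
    (pvG l).getD c [] = l.filter (fun v => pvKey v == c) := by
  unfold pvG
  rw [getD_group_fold]
  simp [PySem.Dict.getD_empty]

-- B's skeleton dict: every stored value is []
lemma getD_skel_aux (l : List String) (d : PySem.Dict String (List String))
    (h : ∀ c, d.getD c [] = []) (c : String) :
    (l.foldl (fun d v => d.insert (pvKey v) []) d).getD c [] = [] := by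
  induction l generalizing d with
  | nil => exact h c
  | cons v t ih =>
      simp only [List.foldl_cons]
      refine ih _ (fun c' => ?_)
      rw [PySem.Dict.getD_insert]
      split_ifs with hc
      · rfl
      · exact h c'

-- B's skeleton dict: its keys are exactly the distinct keys in first-occurrence order
lemma keys_skel (l : List String) :
    (l.foldl (fun d v => d.insert (pvKey v) ([] : List String)) PySem.Dict.empty).keys
      = PySem.Set.ofList (l.map pvKey) := by
  rw [PySem.Dict.keys_foldl_insert_key]
  simp [PySem.Dict.keys_empty, PySem.Set.update, PySem.Set.ofList_eq_foldl]

lemma nodup_keys_skel (l : List String) :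
    (l.foldl (fun d v => d.insert (pvKey v) ([] : List String)) PySem.Dict.empty).keys.Nodup := by
  exact PySem.Dict.nodup_keys_foldl_insert_key _ _ _ _ (by simp [PySem.Dict.keys_empty])

-- B's final dict, abbreviated
def pvF (l : List String) : PySem.Dict String (List String) :=
  (PySem.List.sorted l (fun x => x) false).foldl
    (fun d v => d.modify (pvKey v) [] (fun g => g ++ [v]))
    (l.foldl (fun d v => d.insert (pvKey v) []) PySem.Dict.empty)

lemma name_lists_alt_eq_pvF (l : List String) : name_lists_alt l = (pvF l).items := rfl

lemma keys_pvF (l : List String) :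
    (pvF l).keys = PySem.Set.ofList (l.map pvKey) := by
  unfold pvF
  rw [PySem.Dict.keys_foldl_modify_key, keys_skel]
  apply set_update_of_subset
  intro x hx
  obtain ⟨v, hv, rfl⟩ := List.mem_map.mp hx
  have hv' : v ∈ l := (PySem.List.mem_sorted _ _ _ _).mp hv
  exact (PySem.Set.mem_ofList _ _).mpr (List.mem_map_of_mem hv')

lemma nodup_keys_pvF (l : List String) : (pvF l).keys.Nodup := by
  unfold pvF
  exact PySem.Dict.nodup_keys_foldl_modify_key _ _ _ _ _ (nodup_keys_skel l)

lemma getD_pvF (l : List String) (c : String) :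
    (pvF l).getD c []
      = (PySem.List.sorted l (fun x => x) false).filter (fun v => pvKey v == c) := by
  unfold pvF
  rw [getD_group_fold, getD_skel_aux _ _ (fun _ => rfl)]
  simp

-- the heart of B's correctness: filtering a globally sorted list = sorting the filtered list
lemma filter_sorted (l : List String) (p : String → Bool) :
    (PySem.List.sorted l (fun x => x) false).filter p
      = PySem.List.sorted (l.filter p) (fun x => x) false := by
  symm
  apply PySem.List.sorted_id_eq_of_perm_of_pairwise
  · exact (PySem.List.sorted_perm l (fun x => x) false).filter p
  · exact (PySem.List.sorted_pairwise l (fun x => x)).filter p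

-- ===== VERDICT (by name: the statement is the Claim_ definition above) =====
theorem name_lists_spec : Claim_equal_name_lists := by
  intro name_list _ _
  unfold Spec_name_lists
  rw [name_lists_eq_sortG, name_lists_alt_eq_pvF,
      PySem.Dict.items_eq_map_keys (pvG name_list) (nodup_keys_pvG name_list) [],
      PySem.Dict.items_eq_map_keys (pvF name_list) (nodup_keys_pvF name_list) [],
      keys_pvG, keys_pvF, List.map_map]
  apply List.map_congr_left
  intro c _
  simp only [Function.comp_def, pvSortKV, getD_pvG, getD_pvF, filter_sorted]
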